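-- pv_equiv track=rewrite | github.com/TheRealClodius/learning-tools | agents/client_agent.py | _extract_context_from_message
-- ===== SOURCE A (Python) =====
-- def _extract_context_from_message(user_message: str) -> str:
--     """Extract context information appended to user message"""
--     if "[Context:" in user_message:
--         context_start = user_message.find("[Context:")
--         context_end = user_message.find("]", context_start)
--         if context_end != -1:
--             context_part = user_message[context_start+9:context_end]  # Skip "[Context:"
--             # Format context nicely
--             context_items = [item.strip() for item in context_part.split(",")]
--             return "\n".join(context_items)
--     return ""
-- ===== SOURCE B (Python) =====
-- def _extract_context_from_message(user_message: str) -> str: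
--     """Single left-to-right scan: locate the marker, then build the stripped
--     items one character at a time (no index arithmetic, no slicing passes)."""
--     marker = "[Context:"
--     n = len(user_message)
--     i = 0
--     while i < n and not user_message.startswith(marker, i):
--         i += 1
--     if i >= n:
--         return ""
--     items = []
--     cur = []
--     j = i + len(marker)
--     while j < n:
--         c = user_message[j]
--         if c == ']':
--             items.append("".join(cur).strip())
--             return "\n".join(items)
--         if c == ',':
--             items.append("".join(cur).strip())
--             cur = []
--         else:
--             cur.append(c)
--         j += 1
--     return ""
-- ===== Notes on version B (the rewrite author's own statement) =====
-- stated objective: alternative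
-- what changed: Replaces the find/find/slice/split/strip/join pipeline (several passes over the string) with a single left-to-right scan that locates the marker and then builds the stripped items incrementally character by character.
import Mathlib
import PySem

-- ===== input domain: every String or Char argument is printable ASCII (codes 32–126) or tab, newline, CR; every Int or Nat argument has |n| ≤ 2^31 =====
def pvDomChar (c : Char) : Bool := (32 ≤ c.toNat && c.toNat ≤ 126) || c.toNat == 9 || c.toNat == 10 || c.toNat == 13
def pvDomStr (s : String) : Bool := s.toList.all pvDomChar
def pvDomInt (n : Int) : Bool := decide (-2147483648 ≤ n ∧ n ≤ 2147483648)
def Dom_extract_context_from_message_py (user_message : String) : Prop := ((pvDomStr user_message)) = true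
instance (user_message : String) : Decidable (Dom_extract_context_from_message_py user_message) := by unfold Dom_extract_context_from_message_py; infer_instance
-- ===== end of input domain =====

-- B replaces A's find/slice/split multi-pass pipeline by a single left-to-right scan
-- that builds the stripped items incrementally (alternative decomposition, same cost).

-- ===== PORT A =====
def extract_context_from_message_py (user_message : String) : String :=
  if PySem.Str.isIn "[Context:" user_message then
    let context_start := PySem.Str.find user_message "[Context:"
    let context_end := PySem.Str.findFrom user_message "]" context_start
    if context_end ≠ -1 then
      let context_part := PySem.Str.slice user_message (some (context_start + 9)) (some context_end)
      let context_items := ((PySem.Str.split? context_part ",").getD []).map PySem.Str.strip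
      PySem.Str.join "\n" context_items
    else ""
  else ""

-- ===== PORT B =====
-- 'while i < n and not startswith(marker, i)' scan, as recursion on the char list
def pvScanMarker : List Char → Option (List Char)
  | [] => none
  | c :: rest =>
      if PySem.Chars.startswith (c :: rest) "[Context:".toList then some ((c :: rest).drop 9)
      else pvScanMarker rest

-- the item-building loop: cur = current item chars, items = finished stripped items
def pvCollect : List Char → List Char → List (List Char) → List Char
  | [], _, _ => []
  | c :: rest, cur, items =>
      if c = ']' then PySem.Chars.join ['\n'] (items ++ [PySem.Chars.strip cur])
      else if c = ',' then pvCollect rest [] (items ++ [PySem.Chars.strip cur])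
      else pvCollect rest (cur ++ [c]) items

def extract_context_from_message_py_alt (user_message : String) : String :=
  match pvScanMarker user_message.toList with
  | none => ""
  | some tail => String.ofList (pvCollect tail [] [])

-- ===== PRECONDITION & SPEC =====
def Spec_extract_context_from_message_py (user_message : String) (out : String) : Prop := out = extract_context_from_message_py_alt user_message
instance (user_message : String) (out : String) : Decidable (Spec_extract_context_from_message_py user_message out) := by unfold Spec_extract_context_from_message_py; infer_instance

-- ===== CLAIM (what is proved, stated in full; the proofs are below) =====
def Claim_equal_extract_context_from_message_py : Prop := ∀ (user_message : String), Dom_extract_context_from_message_py user_message → Spec_extract_context_from_message_py user_message (extract_context_from_message_py user_message)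

-- ===== LEMMAS AND PROOFS =====

lemma single_isPrefixOf_cons (a c : Char) (l : List Char) :
    ([a].isPrefixOf (c :: l)) = (a == c) := by
  simp [List.isPrefixOf]

lemma startswith_eq_isPrefixOf (s p : List Char) :
    PySem.Chars.startswith s p = p.isPrefixOf s := rfl

-- a simple structural comma-split, used as common reference point of both ports
def mySplit : List Char → List (List Char)
  | [] => [[]]
  | c :: rest =>
      if c = ',' then [] :: mySplit rest
      else
        match mySplit rest with
        | [] => [[c]]
        | h :: t => (c :: h) :: t

lemma mySplit_ne_nil (l : List Char) : mySplit l ≠ [] := by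
  cases l with
  | nil => simp [mySplit]
  | cons c rest =>
    simp only [mySplit]
    split
    · simp
    · cases h : mySplit rest <;> simp

lemma mySplit_no_comma {l : List Char} (h : ',' ∉ l) : mySplit l = [l] := by
  induction l with
  | nil => rfl
  | cons c rest ih =>
    simp only [List.mem_cons, not_or] at h
    simp only [mySplit, if_neg (Ne.symm h.1), ih h.2]

lemma mySplit_append {a : List Char} (b : List Char) (h : ',' ∉ a) :
    mySplit (a ++ ',' :: b) = a :: mySplit b := by
  induction a with
  | nil => simp [mySplit]
  | cons c rest ih =>
    simp only [List.mem_cons, not_or] at h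
    simp only [List.cons_append, mySplit, if_neg (Ne.symm h.1), ih h.2]

-- splitOn.go with sep = [','] computes mySplit
lemma splitOn_go_eq (fuel : Nat) :
    ∀ (l cur : List Char) (acc : List (List Char)), l.length < fuel →
      PySem.Chars.splitOn.go [','] fuel l cur acc =
        acc.reverse ++ (match mySplit l with
                        | [] => [cur.reverse]
                        | h :: t => (cur.reverse ++ h) :: t) := by
  induction fuel with
  | zero => intro l cur acc h; omega
  | succ fuel ih =>
    intro l cur acc h
    cases l with
    | nil => simp [PySem.Chars.splitOn.go, mySplit]
    | cons c rest =>
      by_cases hc : c = ','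
      · subst hc
        simp only [List.length_cons] at h
        simp only [PySem.Chars.splitOn.go]
        have hpre : (([','] : List Char).isPrefixOf (',' :: rest)) = true := by
          rw [single_isPrefixOf_cons]; rfl
        rw [if_pos hpre]
        simp only [List.length_cons, List.length_nil, List.drop_succ_cons, List.drop_zero]
        rw [ih rest [] (cur.reverse :: acc) (by omega)]
        simp only [mySplit, reduceIte]
        cases hm : mySplit rest with
        | nil => exact absurd hm (mySplit_ne_nil rest)
        | cons h t => simp
      · simp only [List.length_cons] at h
        simp only [PySem.Chars.splitOn.go]
        have hpre : ¬((([','] : List Char).isPrefixOf (c :: rest)) = true) := by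
          rw [single_isPrefixOf_cons]
          simp
          exact fun hh => hc hh.symm
        rw [if_neg hpre]
        rw [ih rest (c :: cur) acc (by omega)]
        simp only [mySplit, if_neg hc]
        cases hm : mySplit rest with
        | nil => exact absurd hm (mySplit_ne_nil rest)
        | cons h t => simp

lemma splitOn_comma (l : List Char) : PySem.Chars.splitOn l [','] = mySplit l := by
  unfold PySem.Chars.splitOn
  rw [splitOn_go_eq (l.length + 1) l [] [] (by omega)]
  cases hm : mySplit l with
  | nil => exact absurd hm (mySplit_ne_nil l)
  | cons h t => simp

-- shifting the start counter of find.go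
lemma find_go_shift (sub : List Char) :
    ∀ (l : List Char) (k : Nat),
      PySem.Chars.find.go sub l k =
        if PySem.Chars.find.go sub l 0 = -1 then -1 else PySem.Chars.find.go sub l 0 + k := by
  intro l
  induction l with
  | nil =>
    intro k
    by_cases he : sub.isEmpty = true
    · simp [PySem.Chars.find.go, he]
    · simp [PySem.Chars.find.go, he]
  | cons c rest ih =>
    intro k
    simp only [PySem.Chars.find.go]
    split
    · simp
    · rw [ih (k + 1), ih 1]
      have hge : -1 ≤ PySem.Chars.find.go sub rest 0 := PySem.Chars.neg_one_le_find rest sub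
      by_cases hg : PySem.Chars.find.go sub rest 0 = -1
      · simp [hg]
      · simp only [hg, if_false]
        rw [if_neg (by omega)]
        push_cast
        ring

lemma find_cons (sub : List Char) (c : Char) (t : List Char) :
    PySem.Chars.find (c :: t) sub =
      if sub.isPrefixOf (c :: t) then 0
      else if PySem.Chars.find t sub = -1 then -1 else PySem.Chars.find t sub + 1 := by
  unfold PySem.Chars.find
  conv_lhs => rw [PySem.Chars.find.go]
  split
  · rfl
  · rw [find_go_shift]; simp

lemma find_nil_of_ne_nil {sub : List Char} (h : sub ≠ []) : PySem.Chars.find [] sub = -1 := by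
  unfold PySem.Chars.find
  rw [PySem.Chars.find.go]
  simp [List.isEmpty_iff, h]

-- single-char search through a prefix not containing the char
lemma find_single_append {a : List Char} (c : Char) (t : List Char) (h : c ∉ a) :
    PySem.Chars.find (a ++ t) [c] =
      if PySem.Chars.find t [c] = -1 then -1 else (a.length : Int) + PySem.Chars.find t [c] := by
  induction a with
  | nil => simp
  | cons x rest ih =>
    simp only [List.mem_cons, not_or] at h
    rw [List.cons_append, find_cons, ih h.2]
    rw [single_isPrefixOf_cons]
    rw [if_neg (by simp; exact h.1)]
    simp only [List.length_cons]
    have h1 := PySem.Chars.neg_one_le_find t [c]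
    by_cases hf : PySem.Chars.find t [c] = -1
    · simp [hf]
    · simp only [hf, if_false]
      rw [if_neg (by omega)]
      push_cast
      ring

-- the scan loop finds exactly what str.find finds
lemma scan_eq (l : List Char) :
    pvScanMarker l =
      if PySem.Chars.find l "[Context:".toList = -1 then none
      else some (l.drop ((PySem.Chars.find l "[Context:".toList).toNat + 9)) := by
  induction l with
  | nil => rw [find_nil_of_ne_nil (by decide)]; simp [pvScanMarker]
  | cons c rest ih =>
    rw [pvScanMarker, find_cons, startswith_eq_isPrefixOf]
    by_cases hp : ("[Context:".toList).isPrefixOf (c :: rest) = true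
    · rw [if_pos hp, if_pos hp, if_neg (by norm_num)]
      norm_num
    · rw [if_neg hp, if_neg hp, ih]
      have hge := PySem.Chars.neg_one_le_find rest "[Context:".toList
      by_cases hf : PySem.Chars.find rest "[Context:".toList = -1
      · rw [if_pos hf]
        have hinner : (if PySem.Chars.find rest "[Context:".toList = -1 then (-1 : Int)
            else PySem.Chars.find rest "[Context:".toList + 1) = -1 := by rw [if_pos hf]
        rw [if_pos hinner]
      · have hinner : (if PySem.Chars.find rest "[Context:".toList = -1 then (-1 : Int)
            else PySem.Chars.find rest "[Context:".toList + 1)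
            = PySem.Chars.find rest "[Context:".toList + 1 := by rw [if_neg hf]
        rw [hinner, if_neg hf, if_neg (by omega)]
        have h9 : (PySem.Chars.find rest "[Context:".toList + 1).toNat + 9
            = ((PySem.Chars.find rest "[Context:".toList).toNat + 9) + 1 := by omega
        rw [h9, List.drop_succ_cons]

-- the collect loop vs take-to-']' then split/strip/join
lemma collect_eq (tail : List Char) :
    ∀ (cur : List Char) (items : List (List Char)), ',' ∉ cur →
      pvCollect tail cur items =
        if PySem.Chars.find tail [']'] = -1 then []
        else PySem.Chars.join ['\n']
          (items ++ (mySplit (cur ++ tail.take (PySem.Chars.find tail [']']).toNat)).map PySem.Chars.strip) := by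
  induction tail with
  | nil =>
    intro cur items _
    rw [find_nil_of_ne_nil (by decide)]
    simp [pvCollect]
  | cons c rest ih =>
    intro cur items hcur
    rw [pvCollect, find_cons]
    by_cases hc : c = ']'
    · subst hc
      have hpre : (([']'] : List Char).isPrefixOf (']' :: rest)) = true := by
        rw [single_isPrefixOf_cons]; rfl
      rw [if_pos rfl, if_pos hpre, if_neg (by norm_num)]
      simp [mySplit_no_comma hcur]
    · have hpre : (([']'] : List Char).isPrefixOf (c :: rest)) = false := by
        rw [single_isPrefixOf_cons]
        simp
        exact fun hh => hc hh.symm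
      have hnp : ¬((([']'] : List Char).isPrefixOf (c :: rest)) = true) := by
        rw [hpre]; exact Bool.false_ne_true
      rw [if_neg hc, if_neg hnp]
      have hge := PySem.Chars.neg_one_le_find rest [']']
      by_cases hf : PySem.Chars.find rest [']'] = -1
      · have hinner : (if PySem.Chars.find rest [']'] = -1 then (-1 : Int)
            else PySem.Chars.find rest [']'] + 1) = -1 := by rw [if_pos hf]
        rw [if_pos hinner]
        by_cases hcm : c = ','
        · rw [if_pos hcm, ih [] _ (by simp), if_pos hf]
        · rw [if_neg hcm,
              ih (cur ++ [c]) _ (by simp [hcur]; exact fun hh => hcm hh.symm), if_pos hf]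
      · have hinner : (if PySem.Chars.find rest [']'] = -1 then (-1 : Int)
            else PySem.Chars.find rest [']'] + 1)
            = PySem.Chars.find rest [']'] + 1 := by rw [if_neg hf]
        have hne : ¬(PySem.Chars.find rest [']'] + 1 = -1) := by omega
        rw [hinner, if_neg hne]
        have htn : (PySem.Chars.find rest [']'] + 1).toNat
            = (PySem.Chars.find rest [']']).toNat + 1 := by omega
        rw [htn, List.take_succ_cons]
        by_cases hcm : c = ','
        · subst hcm
          rw [if_pos rfl, ih [] _ (by simp), if_neg hf, mySplit_append _ hcur]
          simp
        · rw [if_neg hcm,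
              ih (cur ++ [c]) _ (by simp [hcur]; exact fun hh => hcm hh.symm), if_neg hf]
          rw [List.append_assoc]
          simp

-- ===== VERDICT (by name: the statement is the Claim_ definition above) =====
theorem extract_context_from_message_py_spec : Claim_equal_extract_context_from_message_py := by
  intro user_message _
  unfold Spec_extract_context_from_message_py extract_context_from_message_py extract_context_from_message_py_alt
  rw [scan_eq]
  have hge := PySem.Chars.neg_one_le_find user_message.toList "[Context:".toList
  have hle := PySem.Chars.find_le_length user_message.toList "[Context:".toList
  have hiff : (PySem.Str.isIn "[Context:" user_message = true)
      ↔ ¬(PySem.Chars.find user_message.toList "[Context:".toList = -1) := by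
    rw [PySem.Str.isIn_iff_infix, ← PySem.Chars.find_ne_neg_one_iff]
  by_cases hin : PySem.Chars.find user_message.toList "[Context:".toList = -1
  · rw [if_pos hin, if_neg (fun h => (hiff.mp h) hin)]
  · rw [if_neg hin, if_pos (hiff.mpr hin)]
    obtain ⟨j, hj⟩ : ∃ j : Nat,
        PySem.Chars.find user_message.toList "[Context:".toList = (j : Int) :=
      ⟨(PySem.Chars.find user_message.toList "[Context:".toList).toNat, by omega⟩
    have hpre : "[Context:".toList <+: user_message.toList.drop j := by
      have h := (PySem.Chars.find_spec
        (s := user_message.toList) (sub := "[Context:".toList) (by omega)).1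
      rw [hj] at h
      simpa using h
    have hlen9 : j + 9 ≤ user_message.toList.length := by
      have h := hpre.length_le
      rw [List.length_drop] at h
      have h9 : ("[Context:".toList).length = 9 := rfl
      rw [h9] at h
      omega
    have htail : "[Context:".toList ++ user_message.toList.drop (j + 9)
        = user_message.toList.drop j := by
      have h := List.prefix_iff_eq_append.mp hpre
      simpa [List.drop_drop] using h
    have hff := PySem.Chars.findFrom_natCast user_message.toList "]".toList j (by omega)
    have hfsplit : PySem.Chars.find (user_message.toList.drop j) "]".toList =
        if PySem.Chars.find (user_message.toList.drop (j + 9)) [']'] = -1 then -1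
        else 9 + PySem.Chars.find (user_message.toList.drop (j + 9)) [']'] := by
      rw [← htail]
      have h := find_single_append (a := "[Context:".toList) ']'
        (user_message.toList.drop (j + 9)) (by decide)
      simpa using h
    simp only [PySem.Str.find, PySem.Str.findFrom]
    rw [hj, hff, hfsplit]
    simp only [Int.toNat_natCast]
    have hge2 := PySem.Chars.neg_one_le_find (user_message.toList.drop (j + 9)) [']']
    by_cases hf2 : PySem.Chars.find (user_message.toList.drop (j + 9)) [']'] = -1
    · rw [if_pos hf2, if_neg (fun h => h rfl)]
      show "" = String.ofList (pvCollect (user_message.toList.drop (j + 9)) [] [])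
      rw [collect_eq _ [] [] (by simp), if_pos hf2]
    · obtain ⟨kn, hkn⟩ : ∃ kn : Nat,
          PySem.Chars.find (user_message.toList.drop (j + 9)) [']'] = (kn : Int) :=
        ⟨(PySem.Chars.find (user_message.toList.drop (j + 9)) [']']).toNat, by omega⟩
      rw [if_neg hf2, hkn]
      rw [if_neg (show ¬((9 : Int) + (kn : Int) = -1) by omega)]
      rw [if_pos (show ((j : Int) + (9 + (kn : Int)) ≠ -1) by omega)]
      show PySem.Str.join "\n"
          (((PySem.Str.split? (PySem.Str.slice user_message
              (some ((j : Int) + 9)) (some ((j : Int) + (9 + (kn : Int))))) ",").getD []).map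
            PySem.Str.strip)
        = String.ofList (pvCollect (user_message.toList.drop (j + 9)) [] [])
      have hsl : PySem.Str.slice user_message (some ((j : Int) + 9))
          (some ((j : Int) + (9 + (kn : Int))))
          = String.ofList ((user_message.toList.drop (j + 9)).take kn) := by
        have e1 : ((j : Int) + 9) = ((j + 9 : Nat) : Int) := by push_cast; ring
        have e2 : ((j : Int) + (9 + (kn : Int))) = ((j + 9 + kn : Nat) : Int) := by
          push_cast; ring
        rw [PySem.Str.slice, e1, e2]
        have := PySem.List.slice_natCast user_message.toList (j + 9) (j + 9 + kn)
        simp only [PySem.Chars.slice_eq_listSlice, this]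
        rw [show j + 9 + kn - (j + 9) = kn from by omega]
      rw [hsl, collect_eq _ [] [] (by simp), if_neg hf2, hkn, ← splitOn_comma]
      have hmap : (String.toList ∘ PySem.Str.strip ∘ String.ofList) = PySem.Chars.strip := by
        funext cs
        simp [PySem.Str.strip]
      simp [PySem.Str.join, PySem.Str.split?, PySem.Chars.split?, List.map_map, hmap]
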